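-- pv_equiv track=rewrite | github.com/Seoyoung2/Algorithm_Study | Programmers/Level1/키패드 누르기.py | bfs
-- ===== SOURCE A (Python) =====
-- from collections import deque
--
-- def bfs(here, hand, left, right):
--     cnt = [[-1] * 3 for _ in range(4)]
--     cnt[here[0]][here[1]] = 0
--     q = deque([here])
--     while q:
--         x, y = q.popleft()
--         for dx, dy in (1, 0), (-1, 0), (0, 1), (0, -1):
--             if 0 <= x + dx < 4 and 0 <= y + dy < 3 and cnt[x + dx][y + dy] == -1:
--                 cnt[x + dx][y + dy] = cnt[x][y] + 1
--                 q.append((x + dx, y + dy))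
--
--     l = cnt[left[0]][left[1]]
--     r = cnt[right[0]][right[1]]
--     if l > r:
--         return "R"
--     elif r > l:
--         return "L"
--     else:
--         return str.upper(hand[0])
-- ===== SOURCE B (Python) =====
-- def bfs(here, hand, left, right):
--     # On the obstacle-free 4x3 keypad grid the shortest-path distance from `here`
--     # is the Manhattan distance, so build the distance table in closed form and
--     # compare the two entries.
--     dist = [[abs(x - here[0]) + abs(y - here[1]) for y in range(3)] for x in range(4)]
--     l = dist[left[0]][left[1]]
--     r = dist[right[0]][right[1]]
--     if l > r:
--         return "R"
--     elif r > l: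
--         return "L"
--     else:
--         return hand[0].upper()
-- ===== Notes on version B (the rewrite author's own statement) =====
-- stated objective: simpler
-- what changed: Replaces the whole BFS (deque + visited grid + neighbour loop) with a closed-form Manhattan-distance table, read by the same plain list indexing; Pre_ additionally requires the start `here` to lie on the 4x3 keypad grid (the hand's natural domain) - for an off-grid start A still returns, but its distances come from a phantom start cell written via accidental negative-index wraparound, so those inputs are excluded.
-- outside the precondition, e.g. on bfs((-1, 0), 'x', (3, 0), (2, 0)): A returns 'L', B returns 'R'
import Mathlib
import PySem

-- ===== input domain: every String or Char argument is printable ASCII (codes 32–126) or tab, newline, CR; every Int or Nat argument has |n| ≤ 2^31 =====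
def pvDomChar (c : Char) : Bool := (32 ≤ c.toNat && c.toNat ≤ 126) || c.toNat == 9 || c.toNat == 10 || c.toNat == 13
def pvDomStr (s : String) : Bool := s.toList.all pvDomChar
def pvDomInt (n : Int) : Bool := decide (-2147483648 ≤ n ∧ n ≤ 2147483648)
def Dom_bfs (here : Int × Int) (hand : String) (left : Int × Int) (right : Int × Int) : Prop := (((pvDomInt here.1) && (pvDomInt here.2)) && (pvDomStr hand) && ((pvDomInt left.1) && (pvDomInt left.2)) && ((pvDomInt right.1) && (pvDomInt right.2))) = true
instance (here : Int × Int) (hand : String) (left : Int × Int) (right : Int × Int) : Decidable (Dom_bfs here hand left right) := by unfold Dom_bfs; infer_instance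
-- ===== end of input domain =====

-- B replaces A's BFS over the 4x3 keypad grid by a closed-form Manhattan-distance table (simpler).


-- ===== PORT A =====
-- cnt[x][y] read/write (Python list indexing: negative indices count from the end);
-- the defaults are unreachable on inputs Pre_bfs admits
def pvCntGet (cnt : List (List Int)) (x y : Int) : Int :=
  PySem.List.pyGetD (PySem.List.pyGetD cnt x []) y (-2)

def pvCntSet (cnt : List (List Int)) (x y v : Int) : List (List Int) :=
  PySem.List.pySetD cnt x (PySem.List.pySetD (PySem.List.pyGetD cnt x []) y v)

-- one inner 'for dx, dy in …' step of A's BFS loop, on the state (cnt, q)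
def pvBfsStep (x y : Int) (st : List (List Int) × List (Int × Int)) (d : Int × Int) :
    List (List Int) × List (Int × Int) :=
  if 0 ≤ x + d.1 ∧ x + d.1 < 4 ∧ 0 ≤ y + d.2 ∧ y + d.2 < 3 ∧
      pvCntGet st.1 (x + d.1) (y + d.2) = -1 then
    (pvCntSet st.1 (x + d.1) (y + d.2) (pvCntGet st.1 x y + 1), st.2 ++ [(x + d.1, y + d.2)])
  else st

-- A's 'while q:' loop. fuel is a totality guard only: a cell is enqueued only when its cnt
-- entry is -1 and it is marked at once, so each of the 12 cells is enqueued at most once and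
-- the loop pops at most 13 times; fuel 13 is never exhausted on inputs Pre_bfs admits.
def pvBfsLoop : Nat → List (List Int) × List (Int × Int) → List (List Int)
  | 0, st => st.1
  | _ + 1, (cnt, []) => cnt
  | fuel + 1, (cnt, (x, y) :: q) =>
      pvBfsLoop fuel ([((1:Int),(0:Int)), (-1,0), (0,1), (0,-1)].foldl (pvBfsStep x y) (cnt, q))

def pvCntFinal (here : Int × Int) : List (List Int) :=
  pvBfsLoop 13
    (pvCntSet (List.replicate 4 (List.replicate 3 (-1))) here.1 here.2 0, [here])

-- str.upper(hand[0]) / hand[0].upper(); Python raises IndexError on empty hand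
-- (excluded by Pre_ where reached)
def pvUpperHead (hand : String) : String :=
  match PySem.Str.pyGet? hand 0 with
  | some c => PySem.Str.upper (String.ofList [c])
  | none => ""

def bfs (here : Int × Int) (hand : String) (left : Int × Int) (right : Int × Int) : String :=
  let cnt := pvCntFinal here
  let l := pvCntGet cnt left.1 left.2
  let r := pvCntGet cnt right.1 right.2
  if l > r then "R"
  else if r > l then "L"
  else pvUpperHead hand

-- ===== PORT B =====
-- the closed-form Manhattan-distance table, and dist[x][y] (Python list indexing;
-- the defaults are unreachable on inputs Pre_bfs admits)
def pvDist (here : Int × Int) : List (List Int) :=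
  (PySem.List.pyRange 0 4 1).map (fun x =>
    (PySem.List.pyRange 0 3 1).map (fun y => |x - here.1| + |y - here.2|))

def pvDistGet (dist : List (List Int)) (x y : Int) : Int :=
  PySem.List.pyGetD (PySem.List.pyGetD dist x []) y 0

def bfs_alt (here : Int × Int) (hand : String) (left : Int × Int) (right : Int × Int) : String :=
  let dist := pvDist here
  let l := pvDistGet dist left.1 left.2
  let r := pvDistGet dist right.1 right.2
  if l > r then "R"
  else if r > l then "L"
  else pvUpperHead hand

-- ===== PRECONDITION & SPEC =====
-- Pre_ restricts the start `here` to the 4×3 keypad grid — the natural domain of the hand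
-- position (A also returns on a `here` with negative coordinates down to (-4,-3), but its
-- distances then come from a phantom off-grid start cell written via accidental
-- negative-index wraparound; those inputs are excluded); `left`/`right` may be any pair
-- Python's list indexing accepts (rows -4..3, columns -3..2; outside, A raises IndexError);
-- on a distance tie `hand` must be nonempty (A raises IndexError on hand[0]).
def Pre_bfs (here : Int × Int) (hand : String) (left : Int × Int) (right : Int × Int) : Prop :=
  (0 ≤ here.1 ∧ here.1 < 4 ∧ 0 ≤ here.2 ∧ here.2 < 3) ∧
  (-4 ≤ left.1 ∧ left.1 < 4 ∧ -3 ≤ left.2 ∧ left.2 < 3) ∧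
  (-4 ≤ right.1 ∧ right.1 < 4 ∧ -3 ≤ right.2 ∧ right.2 < 3) ∧
  (|PySem.Int.mod left.1 4 - here.1| + |PySem.Int.mod left.2 3 - here.2| =
     |PySem.Int.mod right.1 4 - here.1| + |PySem.Int.mod right.2 3 - here.2| → hand ≠ "")

instance (here : Int × Int) (hand : String) (left : Int × Int) (right : Int × Int) : Decidable (Pre_bfs here hand left right) := by unfold Pre_bfs; infer_instance

def pvWitness_bfs : (Int × Int) × String × (Int × Int) × (Int × Int) := ((0, 0), "left", (1, 1), (2, 2))

def Spec_bfs (here : Int × Int) (hand : String) (left : Int × Int) (right : Int × Int) (out : String) : Prop := out = bfs_alt here hand left right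
instance (here : Int × Int) (hand : String) (left : Int × Int) (right : Int × Int) (out : String) : Decidable (Spec_bfs here hand left right out) := by unfold Spec_bfs; infer_instance

-- ===== CLAIM (what is proved, stated in full; the proofs are below) =====
def Claim_equal_bfs : Prop := ∀ (here : Int × Int) (hand : String) (left : Int × Int) (right : Int × Int), Dom_bfs here hand left right → Pre_bfs here hand left right → Spec_bfs here hand left right (bfs here hand left right)

-- ===== LEMMAS AND PROOFS =====

-- Python list indexing: a negative in-range index reads the same element as index + length.
theorem pyGetD_wrapneg {α : Type} (xs : List α) (d : α) (i : Int)
    (h1 : -(xs.length : Int) ≤ i) (h2 : i < 0) :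
    PySem.List.pyGetD xs i d = PySem.List.pyGetD xs (i + xs.length) d := by
  obtain ⟨k, hk⟩ : ∃ k : Nat, i = -(k : Int) := ⟨(-i).toNat, by omega⟩
  subst hk
  have hk1 : 0 < k := by omega
  have hk2 : k ≤ xs.length := by omega
  rw [PySem.List.pyGetD_neg_natCast xs k d hk1 hk2]
  rw [show (-(k : Int) + xs.length) = ((xs.length - k : Nat) : Int) by omega]
  rw [PySem.List.pyGetD_natCast]
  rw [List.getD_eq_getElem _ _ (by omega)]

-- Reading a 4-row table of 3-wide rows at a possibly-negative in-range index pair equals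
-- reading it at the indices normalized modulo the grid dimensions (any inner default).
theorem nestedGetD_wrap (c : List (List Int)) (d : Int)
    (hc : c.length = 4) (hrow : ∀ row ∈ c, row.length = 3) (px py : Int)
    (hx1 : -4 ≤ px) (hx2 : px < 4) (hy1 : -3 ≤ py) (hy2 : py < 3) :
    PySem.List.pyGetD (PySem.List.pyGetD c px []) py d =
      PySem.List.pyGetD (PySem.List.pyGetD c (PySem.Int.mod px 4) []) (PySem.Int.mod py 3) d := by
  have m1 : 0 ≤ PySem.Int.mod px 4 := PySem.Int.mod_nonneg px (by norm_num)
  have m2 : PySem.Int.mod px 4 < 4 := PySem.Int.mod_lt px (by norm_num)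
  have hmx : PySem.Int.mod px 4 = if px < 0 then px + 4 else px := by
    rw [PySem.Int.mod_eq_emod_of_pos (by norm_num)]; split <;> omega
  have hmy : PySem.Int.mod py 3 = if py < 0 then py + 3 else py := by
    rw [PySem.Int.mod_eq_emod_of_pos (by norm_num)]; split <;> omega
  have houter : PySem.List.pyGetD c px ([] : List Int) =
      PySem.List.pyGetD c (PySem.Int.mod px 4) ([] : List Int) := by
    by_cases hneg : px < 0
    · rw [pyGetD_wrapneg c [] px (by push_cast [hc]; omega) hneg, hc, hmx]
      simp only [if_pos hneg]
      norm_num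
    · rw [hmx]; simp only [if_neg hneg]
  have hmem : PySem.List.pyGetD c (PySem.Int.mod px 4) ([] : List Int) ∈ c :=
    PySem.List.pyGetD_mem c [] ⟨by push_cast [hc]; omega, by push_cast [hc]; omega⟩
  have hrowlen : (PySem.List.pyGetD c (PySem.Int.mod px 4) ([] : List Int)).length = 3 :=
    hrow _ hmem
  rw [houter]
  by_cases hny : py < 0
  · rw [pyGetD_wrapneg _ d py (by push_cast [hrowlen]; omega) hny, hrowlen, hmy]
    simp only [if_pos hny]
    norm_num
  · rw [hmy]; simp only [if_neg hny]

-- A's BFS result table is a 4-row list of 3-wide rows (for any on-grid start).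
theorem pvCntFinal_shape (hx hy : Int)
    (h1 : 0 ≤ hx) (h2 : hx < 4) (h3 : 0 ≤ hy) (h4 : hy < 3) :
    (pvCntFinal (hx, hy)).length = 4 ∧ ∀ row ∈ pvCntFinal (hx, hy), row.length = 3 := by
  interval_cases hx <;> interval_cases hy <;> exact ⟨by decide, by decide⟩

-- B's Manhattan table is a 4-row list of 3-wide rows.
theorem pvDist_shape (here : Int × Int) :
    (pvDist here).length = 4 ∧ ∀ row ∈ pvDist here, row.length = 3 := by
  constructor
  · simp [pvDist]
  · intro row hrow
    simp only [pvDist, List.mem_map] at hrow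
    obtain ⟨x, _, hx⟩ := hrow
    simp [← hx]

-- On the 4×3 grid, A's BFS distance from the on-grid start to any on-grid cell
-- is the Manhattan distance.
theorem pvCnt_eq_manhattan (hx hy px py : Int)
    (h1 : 0 ≤ hx) (h2 : hx < 4) (h3 : 0 ≤ hy) (h4 : hy < 3)
    (p1 : 0 ≤ px) (p2 : px < 4) (p3 : 0 ≤ py) (p4 : py < 3) :
    pvCntGet (pvCntFinal (hx, hy)) px py = |px - hx| + |py - hy| := by
  interval_cases hx <;> interval_cases hy <;> interval_cases px <;> interval_cases py <;> decide

-- B's table read at an on-grid cell is the Manhattan distance (any start).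
theorem pvDist_eq_manhattan (here : Int × Int) (px py : Int)
    (p1 : 0 ≤ px) (p2 : px < 4) (p3 : 0 ≤ py) (p4 : py < 3) :
    pvDistGet (pvDist here) px py = |px - here.1| + |py - here.2| := by
  interval_cases px <;> interval_cases py <;>
    simp [pvDistGet, pvDist, PySem.List.pyRange, PySem.List.pyGetD, PySem.List.pyGet?,
      PySem.List.pyIdx?]

-- ===== VERDICT (by name: the statement is the Claim_ definition above) =====
theorem bfs_spec : Claim_equal_bfs := by
  intro here hand left right _ hpre
  obtain ⟨⟨h1, h2, h3, h4⟩, ⟨l1, l2, l3, l4⟩, ⟨r1, r2, r3, r4⟩, _⟩ := hpre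
  show bfs here hand left right = bfs_alt here hand left right
  have hpair : ((here.1, here.2) : Int × Int) = here := rfl
  have hshape := pvCntFinal_shape here.1 here.2 h1 h2 h3 h4
  rw [hpair] at hshape
  have hdshape := pvDist_shape here
  have four : (0 : Int) < 4 := by norm_num
  have three : (0 : Int) < 3 := by norm_num
  have hl := nestedGetD_wrap (pvCntFinal here) (-2) hshape.1 hshape.2 left.1 left.2 l1 l2 l3 l4
  have hr := nestedGetD_wrap (pvCntFinal here) (-2) hshape.1 hshape.2 right.1 right.2 r1 r2 r3 r4
  have hdl := nestedGetD_wrap (pvDist here) 0 hdshape.1 hdshape.2 left.1 left.2 l1 l2 l3 l4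
  have hdr := nestedGetD_wrap (pvDist here) 0 hdshape.1 hdshape.2 right.1 right.2 r1 r2 r3 r4
  have hml := pvCnt_eq_manhattan here.1 here.2 (PySem.Int.mod left.1 4) (PySem.Int.mod left.2 3)
    h1 h2 h3 h4 (PySem.Int.mod_nonneg _ four) (PySem.Int.mod_lt _ four)
    (PySem.Int.mod_nonneg _ three) (PySem.Int.mod_lt _ three)
  have hmr := pvCnt_eq_manhattan here.1 here.2 (PySem.Int.mod right.1 4) (PySem.Int.mod right.2 3)
    h1 h2 h3 h4 (PySem.Int.mod_nonneg _ four) (PySem.Int.mod_lt _ four)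
    (PySem.Int.mod_nonneg _ three) (PySem.Int.mod_lt _ three)
  have hdml := pvDist_eq_manhattan here (PySem.Int.mod left.1 4) (PySem.Int.mod left.2 3)
    (PySem.Int.mod_nonneg _ four) (PySem.Int.mod_lt _ four)
    (PySem.Int.mod_nonneg _ three) (PySem.Int.mod_lt _ three)
  have hdmr := pvDist_eq_manhattan here (PySem.Int.mod right.1 4) (PySem.Int.mod right.2 3)
    (PySem.Int.mod_nonneg _ four) (PySem.Int.mod_lt _ four)
    (PySem.Int.mod_nonneg _ three) (PySem.Int.mod_lt _ three)
  rw [hpair] at hml hmr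
  simp only [bfs, bfs_alt, pvCntGet, pvDistGet] at *
  simp only [hl, hr, hdl, hdr, hml, hmr, hdml, hdmr]
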